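-- pv_equiv track=rewrite | github.com/wintone123/bioinfo | course/lesson2.py | SymbolArray
-- ===== SOURCE A (Python) =====
-- def PatternCount(Text, Pattern):
--     count = 0
--     for i in range(len(Text) - len(Pattern) + 1):
--         if Text[i : i + len(Pattern)] == Pattern:
--             count += 1
--     return count
--
-- def SymbolArray(Genome, symbol):
--     array = []
--     n = len(Genome)
--     ExtendedGenome = Genome + Genome[0 : n//2]
--     for i in range(n):
--         count = PatternCount(ExtendedGenome[i : i + n//2], symbol)
--         array.append(count)
--     return array
-- ===== SOURCE B (Python) =====
-- def SymbolArray(Genome, symbol):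
--     # One pass: mark every occurrence of symbol in the extended genome once,
--     # take prefix sums, then read each window's count as a difference in O(1).
--     n = len(Genome)
--     w = n // 2
--     m = len(symbol)
--     span = w - m + 1
--     if span <= 0:
--         # the symbol is longer than a half-length window: no window contains it
--         return [0] * n
--     ext = Genome + Genome[:w]
--     total = 0
--     prefix = [0]
--     for j in range(len(ext) - m + 1):
--         if ext[j:j + m] == symbol:
--             total += 1
--         prefix.append(total)
--     return [prefix[i + span] - prefix[i] for i in range(n)]
-- ===== Notes on version B (the rewrite author's own statement) =====
-- stated objective: faster
-- what changed: Instead of rescanning each half-length window with PatternCount (O(n) windows x O(n*m) scan), B marks every occurrence of symbol in the extended genome in one pass, builds prefix sums of those marks, and reads each window's count as a prefix difference in O(1).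
import Mathlib
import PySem

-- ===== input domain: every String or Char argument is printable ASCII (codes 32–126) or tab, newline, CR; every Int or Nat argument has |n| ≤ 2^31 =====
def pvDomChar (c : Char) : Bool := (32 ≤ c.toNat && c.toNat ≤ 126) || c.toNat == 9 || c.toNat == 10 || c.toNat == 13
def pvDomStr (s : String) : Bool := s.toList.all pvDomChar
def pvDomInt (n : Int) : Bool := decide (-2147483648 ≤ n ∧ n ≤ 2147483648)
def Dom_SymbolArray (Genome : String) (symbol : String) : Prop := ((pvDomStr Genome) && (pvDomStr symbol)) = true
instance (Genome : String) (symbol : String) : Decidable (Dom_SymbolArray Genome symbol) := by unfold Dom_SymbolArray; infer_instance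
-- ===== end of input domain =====

-- B replaces A's per-window rescan by one match pass over the extended genome plus
-- prefix sums, reading each window count as a difference (objective: faster).

-- ===== PORT A =====
def pyPatternCount (Text : List Char) (Pattern : List Char) : Int :=
  (PySem.List.pyRange 0 ((Text.length : Int) - (Pattern.length : Int) + 1)).foldl
    (fun count i =>
      if PySem.List.slice Text (some i) (some (i + (Pattern.length : Int))) == Pattern then count + 1
      else count) 0

def SymbolArray (Genome : String) (symbol : String) : List Int :=
  let g := Genome.toList
  let n : Int := (g.length : Int)
  let ext := g ++ PySem.List.slice g (some 0) (some (PySem.Int.floordiv n 2))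
  (PySem.List.pyRange 0 n).foldl
    (fun array i =>
      array ++ [pyPatternCount
        (PySem.List.slice ext (some i) (some (i + PySem.Int.floordiv n 2))) symbol.toList])
    []

-- ===== PORT B =====
def SymbolArray_alt (Genome : String) (symbol : String) : List Int :=
  let g := Genome.toList
  let n : Int := (g.length : Int)
  let w := PySem.Int.floordiv n 2
  let m : Int := (symbol.toList.length : Int)
  let span := w - m + 1
  if span ≤ 0 then List.replicate g.length 0
  else
    let ext := g ++ PySem.List.slice g none (some w)
    let tp := (PySem.List.pyRange 0 ((ext.length : Int) - m + 1)).foldl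
        (fun (st : Int × List Int) j =>
          let total := if PySem.List.slice ext (some j) (some (j + m)) == symbol.toList
                       then st.1 + 1 else st.1
          (total, st.2 ++ [total]))
        (0, [0])
    (PySem.List.pyRange 0 n).foldl
      (fun out i =>
        out ++ [PySem.List.pyGetD tp.2 (i + span) 0 - PySem.List.pyGetD tp.2 i 0])
      []

-- ===== PRECONDITION & SPEC =====
def Spec_SymbolArray (Genome : String) (symbol : String) (out : List Int) : Prop := out = SymbolArray_alt Genome symbol
instance (Genome : String) (symbol : String) (out : List Int) : Decidable (Spec_SymbolArray Genome symbol out) := by unfold Spec_SymbolArray; infer_instance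

-- ===== CLAIM (what is proved, stated in full; the proofs are below) =====
def Claim_equal_SymbolArray : Prop := ∀ (Genome : String) (symbol : String), Dom_SymbolArray Genome symbol → Spec_SymbolArray Genome symbol (SymbolArray Genome symbol)

-- ===== LEMMAS AND PROOFS =====

-- extended genome, the match predicate at an absolute position, the match-count
-- prefix function, and the common per-window value both ports compute
def pvExt (g : List Char) : List Char := g ++ g.take (g.length / 2)
def pvQ (g s : List Char) (j : Nat) : Bool := ((pvExt g).drop j).take s.length == s
def pvC (g s : List Char) (j : Nat) : Nat := (List.range j).countP (pvQ g s)
def pvVal (g s : List Char) (i : Nat) : Int :=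
  ((List.range (g.length / 2 + 1 - s.length)).countP (fun k => pvQ g s (i + k)) : Int)

theorem pyRange_nonpos (z : Int) (h : z ≤ 0) : PySem.List.pyRange 0 z = [] := by
  simp [PySem.List.pyRange, show ¬((0:Int) < z) by omega]

theorem length_pvExt (g : List Char) : (pvExt g).length = g.length + g.length / 2 := by
  simp [pvExt]; omega

theorem pvC_succ (g s : List Char) (j : Nat) :
    pvC g s (j + 1) = if pvQ g s j then pvC g s j + 1 else pvC g s j := by
  simp [pvC, List.range_succ, List.countP_append]
  split_ifs with h <;> simp

theorem pvC_add (g s : List Char) (i k : Nat) :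
    pvC g s (i + k) = pvC g s i + (List.range k).countP (fun t => pvQ g s (i + t)) := by
  simp [pvC, List.range_add, List.countP_append, List.countP_map, Function.comp_def]

-- a slice of the extended genome at an absolute position is the match test pvQ
theorem slice_ext_q (g s : List Char) (j : Nat) :
    (PySem.List.slice (pvExt g) (some (j : Int)) (some ((j : Int) + (s.length : Int))) == s)
      = pvQ g s j := by
  have h : ((j : Int) + (s.length : Int)) = ((j + s.length : Nat) : Int) := by push_cast; ring
  rw [h, PySem.List.slice_natCast, Nat.add_sub_cancel_left]
  rfl

-- a slice inside window i of the extended genome is the match test at position i + k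
theorem slice_window_q (g s : List Char) (i k : Nat) (hk : k + s.length ≤ g.length / 2) :
    (PySem.List.slice (((pvExt g).drop i).take (g.length / 2)) (some (k : Int))
        (some ((k : Int) + (s.length : Int))) == s) = pvQ g s (i + k) := by
  have h : ((k : Int) + (s.length : Int)) = ((k + s.length : Nat) : Int) := by push_cast; ring
  rw [h, PySem.List.slice_natCast, Nat.add_sub_cancel_left]
  rw [List.drop_take, List.drop_drop, List.take_take, min_eq_left (by omega)]
  simp [pvQ]

-- A's inner loop on window i counts the matches inside the window
theorem pcount_window (g s : List Char) (i : Nat) (hi : i < g.length) :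
    pyPatternCount (((pvExt g).drop i).take (g.length / 2)) s = pvVal g s i := by
  have hlen : (((((pvExt g).drop i).take (g.length / 2)).length : Int))
      = ((g.length / 2 : Nat) : Int) := by
    have hL := length_pvExt g
    simp only [List.length_take, List.length_drop, hL]
    have : min (g.length / 2) (g.length + g.length / 2 - i) = g.length / 2 := by omega
    rw [this]
  unfold pyPatternCount
  rw [hlen]
  by_cases hmw : s.length ≤ g.length / 2
  · have hstop : (((g.length / 2 : Nat) : Int) - (s.length : Int) + 1)
        = ((g.length / 2 + 1 - s.length : Nat) : Int) := by omega
    rw [hstop, PySem.List.pyRange_zero_natCast, PySem.List.foldl_count_if, List.countP_map]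
    simp only [zero_add, pvVal]
    congr 1
    refine List.countP_congr ?_
    intro k hk
    rw [List.mem_range] at hk
    have h := slice_window_q g s i k (by omega)
    rw [← h]
    simp
  · have hstop : (((g.length / 2 : Nat) : Int) - (s.length : Int) + 1) ≤ 0 := by omega
    rw [pyRange_nonpos _ hstop]
    simp [pvVal, show g.length / 2 + 1 - s.length = 0 by omega]

-- A's port computes pvVal at every index
theorem portA_eq (Genome symbol : String) :
    SymbolArray Genome symbol
      = (List.range Genome.toList.length).map (pvVal Genome.toList symbol.toList) := by
  set g := Genome.toList with hg
  set s := symbol.toList with hs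
  have h2 : PySem.Int.floordiv (g.length : Int) 2 = ((g.length / 2 : Nat) : Int) := by
    exact_mod_cast PySem.Int.floordiv_natCast g.length 2
  have hext : PySem.List.slice g (some 0) (some ((g.length / 2 : Nat) : Int))
      = g.take (g.length / 2) := by
    simpa using PySem.List.slice_natCast g 0 (g.length / 2)
  unfold SymbolArray
  simp only [← hg, ← hs, h2, hext, show g ++ g.take (g.length / 2) = pvExt g from rfl]
  rw [PySem.List.pyRange_zero_natCast, PySem.List.foldl_append_singleton_eq_map,
    List.map_map, List.nil_append]
  refine List.map_congr_left ?_
  intro i hi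
  rw [List.mem_range] at hi
  simp only [Function.comp]
  have hiw : ((i : Int) + ((g.length / 2 : Nat) : Int)) = ((i + g.length / 2 : Nat) : Int) := by
    push_cast; ring
  rw [hiw, PySem.List.slice_natCast, Nat.add_sub_cancel_left]
  exact pcount_window g s i hi

-- the prefix-sum fold of B's port computes (pvC cnt, [pvC 0, ..., pvC cnt])
theorem foldP (g s : List Char) (cnt : Nat) :
    ((List.range cnt).map (fun k : Nat => (k : Int))).foldl
      (fun (st : Int × List Int) j =>
        (if PySem.List.slice (pvExt g) (some j) (some (j + (s.length : Int))) == s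
         then st.1 + 1 else st.1,
         st.2 ++ [if PySem.List.slice (pvExt g) (some j) (some (j + (s.length : Int))) == s
                  then st.1 + 1 else st.1]))
      (0, [0])
    = ((pvC g s cnt : Int), (List.range (cnt + 1)).map (fun j => (pvC g s j : Int))) := by
  induction cnt with
  | zero => simp [pvC]
  | succ k ih =>
    rw [List.range_succ, List.map_append, List.foldl_append, ih]
    simp only [List.map_cons, List.map_nil, List.foldl_cons, List.foldl_nil, slice_ext_q]
    rw [List.range_succ (n := k + 1), List.map_append]
    by_cases hq : pvQ g s k
    · simp [hq, pvC_succ]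
    · simp [hq, pvC_succ]

-- B's port computes pvVal at every index
theorem portB_eq (Genome symbol : String) :
    SymbolArray_alt Genome symbol
      = (List.range Genome.toList.length).map (pvVal Genome.toList symbol.toList) := by
  set g := Genome.toList with hg
  set s := symbol.toList with hs
  have h2 : PySem.Int.floordiv (g.length : Int) 2 = ((g.length / 2 : Nat) : Int) := by
    exact_mod_cast PySem.Int.floordiv_natCast g.length 2
  have hext : PySem.List.slice g none (some ((g.length / 2 : Nat) : Int))
      = g.take (g.length / 2) := by
    rw [PySem.List.slice_to g (by positivity)]
    congr 1
  unfold SymbolArray_alt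
  simp only [← hg, ← hs, h2, hext, show g ++ g.take (g.length / 2) = pvExt g from rfl]
  by_cases hmw : s.length ≤ g.length / 2
  · have hnspan : ¬ (((g.length / 2 : Nat) : Int) - (s.length : Int) + 1 ≤ 0) := by omega
    rw [if_neg hnspan]
    rw [PySem.List.pyRange_zero_natCast, PySem.List.foldl_append_singleton_eq_map,
      List.map_map, List.nil_append]
    refine List.map_congr_left ?_
    intro i hi
    rw [List.mem_range] at hi
    simp only [Function.comp]
    have hmL : s.length ≤ (pvExt g).length := by rw [length_pvExt]; omega
    have hstop : (((pvExt g).length : Int) - (s.length : Int) + 1)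
        = (((pvExt g).length + 1 - s.length : Nat) : Int) := by omega
    rw [hstop, PySem.List.pyRange_zero_natCast, foldP g s ((pvExt g).length + 1 - s.length)]
    have hidx : ((i : Int) + (((g.length / 2 : Nat) : Int) - (s.length : Int) + 1))
        = ((i + (g.length / 2 + 1 - s.length) : Nat) : Int) := by omega
    rw [hidx, PySem.List.pyGetD_natCast, PySem.List.pyGetD_natCast]
    have hL := length_pvExt g
    rw [PySem.List.getD_map_range (fun j => ((pvC g s j : Nat) : Int)) _ _ 0 (by omega),
      PySem.List.getD_map_range (fun j => ((pvC g s j : Nat) : Int)) _ _ 0 (by omega)]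
    rw [pvC_add]
    simp only [pvVal]
    push_cast
    ring
  · have hspan : ((g.length / 2 : Nat) : Int) - (s.length : Int) + 1 ≤ 0 := by omega
    rw [if_pos hspan]
    have hv : ∀ i ∈ List.range g.length, pvVal g s i = 0 := by
      intro i _
      simp [pvVal, show g.length / 2 + 1 - s.length = 0 by omega]
    rw [List.map_congr_left hv]
    simp

-- ===== VERDICT (by name: the statement is the Claim_ definition above) =====
theorem SymbolArray_spec : Claim_equal_SymbolArray := by
  intro Genome symbol _
  unfold Spec_SymbolArray
  rw [portA_eq, portB_eq]
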